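-- pv_equiv track=rewrite | github.com/BIRALES/birales | pybirales/digital_backend/tile_debris.py | calculate_delay
-- ===== SOURCE A (Python) =====
-- def calculate_delay(current_delay, current_tc, target, margin):
--     """
--     Calculate delay for PPS pulse.
--
--     :param current_delay: Current delay
--     :type current_delay: int
--     :param current_tc: Current phase register terminal count
--     :type current_tc: int
--     :param target: target delay
--     :type target: int
--     :param margin: marging, target +-margin
--     :type margin: int
--     :return: Modified phase register terminal count
--     :rtype: int
--     """
--     ref_low = target - margin
--     ref_hi = target + margin
--     for n in range(5):
--         if current_delay <= ref_low:
--             new_delay = current_delay + int((n * 40) / 5)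
--             new_tc = (current_tc + n) % 5
--             if new_delay >= ref_low:
--                 return new_tc
--         elif current_delay >= ref_hi:
--             new_delay = current_delay - int((n * 40) / 5)
--             new_tc = current_tc - n
--             if new_tc < 0:
--                 new_tc += 5
--             if new_delay <= ref_hi:
--                 return new_tc
--         else:
--             return current_tc
-- ===== SOURCE B (Python) =====
-- def calculate_delay(current_delay, current_tc, target, margin):
--     ref_low = target - margin
--     ref_hi = target + margin
--     if current_delay <= ref_low:
--         n = (ref_low - current_delay + 7) // 8
--         if n <= 4:
--             return (current_tc + n) % 5
--         return None
--     if current_delay >= ref_hi: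
--         n = (current_delay - ref_hi + 7) // 8
--         if n <= 4:
--             new_tc = current_tc - n
--             if new_tc < 0:
--                 new_tc += 5
--             return new_tc
--         return None
--     return current_tc
-- ===== Notes on version B (the rewrite author's own statement) =====
-- stated objective: simpler
-- what changed: Replaces A's 5-iteration search loop over candidate steps with a closed-form ceiling division n = (distance+7)//8 and a direct three-way branch.
-- outside the precondition, e.g. on calculate_delay(0, 1, 100, 10): A returns None, B returns None
import Mathlib
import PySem

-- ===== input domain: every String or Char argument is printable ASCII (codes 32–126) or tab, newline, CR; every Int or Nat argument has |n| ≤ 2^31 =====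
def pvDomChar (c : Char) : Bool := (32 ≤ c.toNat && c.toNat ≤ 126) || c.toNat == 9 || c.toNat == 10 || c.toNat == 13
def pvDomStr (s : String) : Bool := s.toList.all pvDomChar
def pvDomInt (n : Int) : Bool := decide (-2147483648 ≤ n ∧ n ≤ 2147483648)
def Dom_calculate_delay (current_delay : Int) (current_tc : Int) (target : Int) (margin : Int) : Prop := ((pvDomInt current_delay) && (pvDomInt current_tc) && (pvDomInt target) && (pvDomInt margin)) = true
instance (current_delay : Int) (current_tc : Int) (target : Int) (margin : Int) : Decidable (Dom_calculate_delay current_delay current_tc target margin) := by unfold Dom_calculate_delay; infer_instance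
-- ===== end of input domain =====

-- B replaces A's 5-step search loop with a closed-form ceiling division; objective: simpler.


-- ===== PORT A =====
-- A's for-loop over range(5) with early returns; fall-through (Python returns None) is
-- excluded by Pre_, the Lean loop returns 0 there (never reached inside Pre_).
def calculate_delay_loop (current_delay : Int) (current_tc : Int) (ref_low : Int) (ref_hi : Int) : List Int → Int
  | [] => 0
  | n :: ns =>
    if current_delay ≤ ref_low then
      let new_delay := current_delay + (n * 40) / 5   -- int((n*40)/5), exact: 5 ∣ n*40
      let new_tc := PySem.Int.mod (current_tc + n) 5
      if new_delay ≥ ref_low then new_tc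
      else calculate_delay_loop current_delay current_tc ref_low ref_hi ns
    else if current_delay ≥ ref_hi then
      let new_delay := current_delay - (n * 40) / 5
      let new_tc := current_tc - n
      let new_tc := if new_tc < 0 then new_tc + 5 else new_tc
      if new_delay ≤ ref_hi then new_tc
      else calculate_delay_loop current_delay current_tc ref_low ref_hi ns
    else current_tc

def calculate_delay (current_delay : Int) (current_tc : Int) (target : Int) (margin : Int) : Int :=
  let ref_low := target - margin
  let ref_hi := target + margin
  calculate_delay_loop current_delay current_tc ref_low ref_hi (PySem.List.pyRange 0 5 1)

-- ===== PORT B =====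
-- closed-form; the 'return None' branches of Source B lie outside Pre_ (Lean value 0 there).
def calculate_delay_alt (current_delay : Int) (current_tc : Int) (target : Int) (margin : Int) : Int :=
  let ref_low := target - margin
  let ref_hi := target + margin
  if current_delay ≤ ref_low then
    let n := PySem.Int.floordiv (ref_low - current_delay + 7) 8
    if n ≤ 4 then PySem.Int.mod (current_tc + n) 5 else 0
  else if current_delay ≥ ref_hi then
    let n := PySem.Int.floordiv (current_delay - ref_hi + 7) 8
    if n ≤ 4 then
      let new_tc := current_tc - n
      if new_tc < 0 then new_tc + 5 else new_tc
    else 0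
  else current_tc

-- ===== PRECONDITION & SPEC =====
-- Pre_ excludes exactly the inputs where A's loop falls through and Python A returns None
-- (no int): the delay more than 32 away from the reference on its side.
def Pre_calculate_delay (current_delay : Int) (current_tc : Int) (target : Int) (margin : Int) : Prop :=
  (current_delay ≤ target - margin → target - margin - current_delay ≤ 32) ∧
  (target - margin < current_delay → target + margin ≤ current_delay → current_delay - (target + margin) ≤ 32)
instance (current_delay : Int) (current_tc : Int) (target : Int) (margin : Int) : Decidable (Pre_calculate_delay current_delay current_tc target margin) := by unfold Pre_calculate_delay; infer_instance

def pvWitness_calculate_delay : Int × Int × Int × Int := (10, 2, 20, 3)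

def Spec_calculate_delay (current_delay : Int) (current_tc : Int) (target : Int) (margin : Int) (out : Int) : Prop := out = calculate_delay_alt current_delay current_tc target margin
instance (current_delay : Int) (current_tc : Int) (target : Int) (margin : Int) (out : Int) : Decidable (Spec_calculate_delay current_delay current_tc target margin out) := by unfold Spec_calculate_delay; infer_instance

-- ===== CLAIM (what is proved, stated in full; the proofs are below) =====
def Claim_equal_calculate_delay : Prop := ∀ (current_delay : Int) (current_tc : Int) (target : Int) (margin : Int), Dom_calculate_delay current_delay current_tc target margin → Pre_calculate_delay current_delay current_tc target margin → Spec_calculate_delay current_delay current_tc target margin (calculate_delay current_delay current_tc target margin)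

-- ===== LEMMAS AND PROOFS =====

-- ===== VERDICT (by name: the statement is the Claim_ definition above) =====
theorem calculate_delay_spec : Claim_equal_calculate_delay := by
  intro cd tc t m _ hpre
  unfold Spec_calculate_delay calculate_delay calculate_delay_alt
  obtain ⟨h1, h2⟩ := hpre
  have hr : PySem.List.pyRange 0 5 1 = [0, 1, 2, 3, 4] := by decide
  rw [hr]
  simp only [calculate_delay_loop, PySem.Int.mod_eq_emod_of_pos (by omega : (0:Int) < 5),
    PySem.Int.floordiv_eq_ediv_of_pos (by omega : (0:Int) < 8)]
  split_ifs <;> omega
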